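-- pv_equiv track=rewrite | github.com/tagir2211/module_2_hard.py | module_2_hard.py | rock_game
-- ===== SOURCE A (Python) =====
-- def rock_game(rock):
--   lain = []
--   #нати все множетели числа
--   for i in range(3, rock + 1):
--     if rock % i == 0:
--       lain.append(i)
--   #разложить множетели суммы натуральных чисел
--   answer = ''
--   for i in range(len(lain)):
--     for j in range(lain[i]):
--       for k in range(lain[i]):
--         if j + k  == lain[i] and j != k and k > j:
--           answer += str(j) + str(k)
--   return(answer)
-- ===== SOURCE B (Python) =====
-- def rock_game(rock):
--     out = []
--     for d in range(3, rock + 1):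
--         if rock % d == 0:
--             for j in range(1, (d - 1) // 2 + 1):
--                 out.append(str(j) + str(d - j))
--     return ''.join(out)
-- ===== Notes on version B (the rewrite author's own statement) =====
-- stated objective: faster
-- what changed: Replaces the quadratic double scan over all (j,k) pairs per divisor with a single loop j = 1 .. (d-1)//2 taking k = d-j directly, and joins collected pieces instead of repeated string concatenation.
import Mathlib
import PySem

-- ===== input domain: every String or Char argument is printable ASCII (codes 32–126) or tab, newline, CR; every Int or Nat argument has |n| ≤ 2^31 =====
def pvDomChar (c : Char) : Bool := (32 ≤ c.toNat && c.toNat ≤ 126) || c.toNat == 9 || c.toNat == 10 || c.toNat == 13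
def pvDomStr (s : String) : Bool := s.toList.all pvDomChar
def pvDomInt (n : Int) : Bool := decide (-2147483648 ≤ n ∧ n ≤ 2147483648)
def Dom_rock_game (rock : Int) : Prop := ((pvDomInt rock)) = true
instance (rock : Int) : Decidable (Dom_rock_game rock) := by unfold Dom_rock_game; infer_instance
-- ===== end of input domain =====

-- B replaces A's quadratic (j,k) double scan per divisor by a single loop j = 1 .. (d-1)//2 with k = d-j (faster: asymptotic in a timing run).


-- ===== PORT A =====
def rock_game (rock : Int) : String :=
  let lain : List Int := (PySem.List.pyRange 3 (rock + 1) 1).foldl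
    (fun acc i => if PySem.Int.mod rock i == 0 then acc ++ [i] else acc) []
  let answer : List Char := (PySem.List.pyRange 0 (PySem.List.len lain) 1).foldl
    (fun ans i =>
      let d := PySem.List.pyGetD lain i 0
      (PySem.List.pyRange 0 d 1).foldl (fun ans j =>
        (PySem.List.pyRange 0 d 1).foldl (fun ans k =>
          if (j + k == d) && !(j == k) && decide (k > j)
          then ans ++ (PySem.Int.toChars j ++ PySem.Int.toChars k) else ans) ans) ans) []
  String.ofList answer

-- ===== PORT B =====
def rock_game_alt (rock : Int) : String :=
  let out : List (List Char) := (PySem.List.pyRange 3 (rock + 1) 1).foldl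
    (fun out d =>
      if PySem.Int.mod rock d == 0 then
        (PySem.List.pyRange 1 (PySem.Int.floordiv (d - 1) 2 + 1) 1).foldl
          (fun out j => out ++ [PySem.Int.toChars j ++ PySem.Int.toChars (d - j)]) out
      else out) []
  String.ofList out.flatten   -- ''.join(out)

-- ===== PRECONDITION & SPEC =====
def Spec_rock_game (rock : Int) (out : String) : Prop := out = rock_game_alt rock
instance (rock : Int) (out : String) : Decidable (Spec_rock_game rock out) := by unfold Spec_rock_game; infer_instance

-- ===== CLAIM (what is proved, stated in full; the proofs are below) =====
def Claim_equal_rock_game : Prop := ∀ (rock : Int), Dom_rock_game rock → Spec_rock_game rock (rock_game rock)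

-- ===== LEMMAS AND PROOFS =====

-- the digits contributed by the summand pair (j, d-j)
def pvPiece (d j : Int) : List Char := PySem.Int.toChars j ++ PySem.Int.toChars (d - j)

-- a guarded appending fold is a flatMap of the guarded pieces
theorem pv_foldl_append_ite {α β : Type} (p : α → Bool) (g : α → List β) (l : List α) (acc : List β) :
    l.foldl (fun acc x => if p x then acc ++ g x else acc) acc
    = acc ++ l.flatMap (fun x => if p x then g x else []) := by
  rw [← PySem.List.foldl_append_eq_flatMap (fun x => if p x then g x else [])]
  apply PySem.List.foldl_congr_mem
  intro a x _
  by_cases h : p x <;> simp [h]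

-- A's innermost k-loop contributes exactly the pair (j, d-j) when 1 ≤ j and 2j < d, else nothing
theorem pv_inner_k (d j : Int) (ans : List Char) :
    (PySem.List.pyRange 0 d 1).foldl (fun ans k =>
      if (j + k == d) && !(j == k) && decide (k > j)
      then ans ++ (PySem.Int.toChars j ++ PySem.Int.toChars k) else ans) ans
    = ans ++ (if 1 ≤ j ∧ 2 * j < d then pvPiece d j else []) := by
  rw [pv_foldl_append_ite (fun k => (j + k == d) && !(j == k) && decide (k > j))
      (fun k => PySem.Int.toChars j ++ PySem.Int.toChars k)]
  congr 1
  by_cases h : 1 ≤ j ∧ 2 * j < d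
  · have hsplit : PySem.List.pyRange 0 d 1
        = PySem.List.pyRange 0 (d - j) 1 ++ PySem.List.pyRange (d - j) d 1 :=
      PySem.List.pyRange_one_append 0 (d - j) d (by omega) (by omega)
    have hsplit2 : PySem.List.pyRange (d - j) d 1
        = (d - j) :: PySem.List.pyRange (d - j + 1) d 1 :=
      PySem.List.pyRange_one_cons (by omega)
    rw [hsplit, hsplit2, List.flatMap_append, List.flatMap_cons]
    have h1 : (PySem.List.pyRange 0 (d - j) 1).flatMap
        (fun k => if (j + k == d) && !(j == k) && decide (k > j)
          then PySem.Int.toChars j ++ PySem.Int.toChars k else []) = [] := by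
      rw [List.flatMap_eq_nil_iff]
      intro k hk
      rw [PySem.List.mem_pyRange_one] at hk
      rw [if_neg]
      simp only [Bool.and_eq_true, beq_iff_eq, Bool.not_eq_eq_eq_not, Bool.not_true,
        decide_eq_true_eq, not_and]
      omega
    have h2 : (PySem.List.pyRange (d - j + 1) d 1).flatMap
        (fun k => if (j + k == d) && !(j == k) && decide (k > j)
          then PySem.Int.toChars j ++ PySem.Int.toChars k else []) = [] := by
      rw [List.flatMap_eq_nil_iff]
      intro k hk
      rw [PySem.List.mem_pyRange_one] at hk
      rw [if_neg]
      simp only [Bool.and_eq_true, beq_iff_eq, Bool.not_eq_eq_eq_not, Bool.not_true,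
        decide_eq_true_eq, not_and]
      omega
    have hc : ((j + (d - j) == d) && !(j == (d - j)) && decide ((d - j) > j)) = true := by
      simp only [Bool.and_eq_true, beq_iff_eq, Bool.not_eq_eq_eq_not, Bool.not_true,
        decide_eq_true_eq, beq_eq_false_iff_ne, ne_eq]
      refine ⟨⟨by omega, by omega⟩, by omega⟩
    rw [h1, h2, hc, if_pos rfl]
    simp [pvPiece, h]
  · have hfil : (PySem.List.pyRange 0 d 1).flatMap
        (fun k => if (j + k == d) && !(j == k) && decide (k > j)
          then PySem.Int.toChars j ++ PySem.Int.toChars k else []) = [] := by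
      rw [List.flatMap_eq_nil_iff]
      intro k hk
      rw [PySem.List.mem_pyRange_one] at hk
      rw [if_neg]
      simp only [Bool.and_eq_true, beq_iff_eq, Bool.not_eq_eq_eq_not, Bool.not_true,
        decide_eq_true_eq, not_and]
      omega
    rw [hfil]
    simp [h]

-- the j bound: 1 ≤ j ∧ 2j < d  ⟺  j ∈ range(1, (d-1)//2 + 1)
theorem pv_bound_iff (d j : Int) :
    (1 ≤ j ∧ 2 * j < d) ↔ (1 ≤ j ∧ j < PySem.Int.floordiv (d - 1) 2 + 1) := by
  have h : j ≤ PySem.Int.floordiv (d - 1) 2 ↔ j * 2 ≤ d - 1 :=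
    PySem.Int.le_floordiv_iff_mul_le (by omega)
  omega

-- A's double (j,k) loop over a divisor d equals B's single loop over j = 1 .. (d-1)//2
theorem pv_inner_j (d : Int) (ans : List Char) :
    (PySem.List.pyRange 0 d 1).foldl (fun ans j =>
      (PySem.List.pyRange 0 d 1).foldl (fun ans k =>
        if (j + k == d) && !(j == k) && decide (k > j)
        then ans ++ (PySem.Int.toChars j ++ PySem.Int.toChars k) else ans) ans) ans
    = ans ++ (PySem.List.pyRange 1 (PySem.Int.floordiv (d - 1) 2 + 1) 1).flatMap (pvPiece d) := by
  have hstep : ∀ (a : List Char), ∀ j ∈ PySem.List.pyRange 0 d 1,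
      (PySem.List.pyRange 0 d 1).foldl (fun ans k =>
        if (j + k == d) && !(j == k) && decide (k > j)
        then ans ++ (PySem.Int.toChars j ++ PySem.Int.toChars k) else ans) a
      = a ++ (if 1 ≤ j ∧ 2 * j < d then pvPiece d j else []) := fun a j _ => pv_inner_k d j a
  rw [PySem.List.foldl_congr_mem _ _ _ ans hstep,
      PySem.List.foldl_append_eq_flatMap (fun j => if 1 ≤ j ∧ 2 * j < d then pvPiece d j else [])]
  congr 1
  by_cases hd : 3 ≤ d
  · have hm1 : 1 ≤ PySem.Int.floordiv (d - 1) 2 := by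
      rw [PySem.Int.le_floordiv_iff_mul_le (by omega)]; omega
    have hm2 : PySem.Int.floordiv (d - 1) 2 + 1 ≤ d := by
      have := (PySem.Int.le_floordiv_iff_mul_le (a := d - 1) (b := 2) (q := d - 1) (by omega))
      omega
    rw [PySem.List.pyRange_one_append 0 1 d (by omega) (by omega),
        PySem.List.pyRange_one_append 1 (PySem.Int.floordiv (d - 1) 2 + 1) d (by omega) hm2,
        List.flatMap_append, List.flatMap_append]
    have h0 : (PySem.List.pyRange 0 1 1).flatMap
        (fun j => if 1 ≤ j ∧ 2 * j < d then pvPiece d j else []) = [] := by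
      have h01 : PySem.List.pyRange 0 1 1 = [0] := by decide
      rw [h01]
      simp
    have hmid : (PySem.List.pyRange 1 (PySem.Int.floordiv (d - 1) 2 + 1) 1).flatMap
        (fun j => if 1 ≤ j ∧ 2 * j < d then pvPiece d j else [])
        = (PySem.List.pyRange 1 (PySem.Int.floordiv (d - 1) 2 + 1) 1).flatMap (pvPiece d) := by
      apply List.flatMap_congr
      intro j hj
      rw [PySem.List.mem_pyRange_one] at hj
      rw [if_pos ((pv_bound_iff d j).mpr hj)]
    have hhi : (PySem.List.pyRange (PySem.Int.floordiv (d - 1) 2 + 1) d 1).flatMap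
        (fun j => if 1 ≤ j ∧ 2 * j < d then pvPiece d j else []) = [] := by
      rw [List.flatMap_eq_nil_iff]
      intro j hj
      rw [PySem.List.mem_pyRange_one] at hj
      rw [if_neg]
      intro hc
      exact absurd ((pv_bound_iff d j).mp hc).2 (by omega)
    rw [h0, hmid, hhi]
    simp
  · have hlhs : (PySem.List.pyRange 0 d 1).flatMap
        (fun j => if 1 ≤ j ∧ 2 * j < d then pvPiece d j else []) = [] := by
      rw [List.flatMap_eq_nil_iff]
      intro j hj
      rw [PySem.List.mem_pyRange_one] at hj
      rw [if_neg]; omega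
    have hrhs : PySem.List.pyRange 1 (PySem.Int.floordiv (d - 1) 2 + 1) 1 = [] := by
      apply PySem.List.pyRange_one_eq_nil
      have h := PySem.Int.le_floordiv_iff_mul_le (a := d - 1) (b := 2) (q := 1) (by omega)
      omega
    rw [hlhs, hrhs]
    simp

-- join of the guarded per-divisor piece lists = flat concatenation over the filtered divisor list
theorem pv_flatten_filter (L : List Int) (p : Int → Bool) (jr : Int → List Int) :
    (L.flatMap (fun d => if p d then (jr d).map (pvPiece d) else [])).flatten
    = (L.filter p).flatMap (fun d => (jr d).flatMap (pvPiece d)) := by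
  induction L with
  | nil => simp
  | cons x xs ih =>
      by_cases hx : p x
      · rw [List.flatMap_cons, if_pos hx, List.flatten_append, ih,
            List.filter_cons_of_pos hx, List.flatMap_cons]
        congr 1
      · rw [List.flatMap_cons, if_neg hx, List.flatten_append, ih,
            List.filter_cons_of_neg hx]
        simp

theorem rock_game_eq (rock : Int) : rock_game rock = rock_game_alt rock := by
  unfold rock_game rock_game_alt
  simp only [PySem.List.len_eq]
  congr 1
  -- A side: lain is a filter
  rw [PySem.List.foldl_append_if (fun i => PySem.Int.mod rock i == 0) (fun i => i)]
  simp only [List.map_id_fun', id, List.nil_append]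
  -- A side: index loop over lain → fold over lain
  rw [PySem.List.foldl_pyRange_zero_pyGetD'
        ((PySem.List.pyRange 3 (rock + 1) 1).filter (fun i => PySem.Int.mod rock i == 0)) 0
        (fun ans d =>
          (PySem.List.pyRange 0 d 1).foldl (fun ans j =>
            (PySem.List.pyRange 0 d 1).foldl (fun ans k =>
              if (j + k == d) && !(j == k) && decide (k > j)
              then ans ++ (PySem.Int.toChars j ++ PySem.Int.toChars k) else ans) ans) ans) []]
  rw [PySem.List.foldl_congr_mem _ _
        (fun ans d => ans ++ (PySem.List.pyRange 1 (PySem.Int.floordiv (d - 1) 2 + 1) 1).flatMap (pvPiece d)) []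
        (fun a d _ => pv_inner_j d a),
      PySem.List.foldl_append_eq_flatMap
        (fun d => (PySem.List.pyRange 1 (PySem.Int.floordiv (d - 1) 2 + 1) 1).flatMap (pvPiece d))]
  -- B side: singleton-append loops → map / flatMap
  rw [PySem.List.foldl_congr_mem (PySem.List.pyRange 3 (rock + 1) 1) _
        (fun out d => out ++ (if PySem.Int.mod rock d == 0
          then (PySem.List.pyRange 1 (PySem.Int.floordiv (d - 1) 2 + 1) 1).map (pvPiece d) else [])) []
        (by
          intro out d _
          dsimp only
          by_cases hdv : PySem.Int.mod rock d == 0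
          · rw [if_pos hdv, if_pos hdv,
              PySem.List.foldl_append_singleton_eq_map
                (fun j => PySem.Int.toChars j ++ PySem.Int.toChars (d - j))]
            simp [pvPiece]
          · rw [if_neg hdv, if_neg hdv, List.append_nil]),
      PySem.List.foldl_append_eq_flatMap
        (fun d => if PySem.Int.mod rock d == 0
          then (PySem.List.pyRange 1 (PySem.Int.floordiv (d - 1) 2 + 1) 1).map (pvPiece d) else [])]
  rw [List.nil_append, List.nil_append,
      pv_flatten_filter (PySem.List.pyRange 3 (rock + 1) 1)
        (fun i => PySem.Int.mod rock i == 0)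
        (fun d => PySem.List.pyRange 1 (PySem.Int.floordiv (d - 1) 2 + 1) 1)]

-- ===== VERDICT (by name: the statement is the Claim_ definition above) =====
theorem rock_game_spec : Claim_equal_rock_game := by
  intro rock _
  unfold Spec_rock_game
  exact rock_game_eq rock
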